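-- pv_equiv track=rewrite | github.com/broadinstitute/qprimer_designer | share/scripts/generate_primers.py | count_primer_pairs
-- ===== SOURCE A (Python) =====
-- import bisect
--
-- def count_primer_pairs(fors, revs, minAmpLen, maxAmpLen):
--     sts = sorted(fors.values())
--     ens_sorted = sorted(revs.values())
--     count = 0
--     for st in sts:
--         left = bisect.bisect_left(ens_sorted, st+minAmpLen)
--         right = bisect.bisect_right(ens_sorted, st+maxAmpLen)
--         count += (right-left)
--     return count
-- ===== SOURCE B (Python) =====
-- def count_primer_pairs(fors, revs, minAmpLen, maxAmpLen):
--     sts = sorted(fors.values())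
--     ens = sorted(revs.values())
--     n = len(ens)
--     lo = hi = 0
--     count = 0
--     for st in sts:
--         while lo < n and ens[lo] < st + minAmpLen:
--             lo += 1
--         while hi < n and ens[hi] <= st + maxAmpLen:
--             hi += 1
--         count += hi - lo
--     return count
-- ===== Notes on version B (the rewrite author's own statement) =====
-- stated objective: faster
-- what changed: Replaces the per-forward-primer binary searches (bisect_left/bisect_right) with a single two-pointer sweep over the sorted reverse endpoints: both window bounds only ever move forward as the forward starts increase.
import Mathlib
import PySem

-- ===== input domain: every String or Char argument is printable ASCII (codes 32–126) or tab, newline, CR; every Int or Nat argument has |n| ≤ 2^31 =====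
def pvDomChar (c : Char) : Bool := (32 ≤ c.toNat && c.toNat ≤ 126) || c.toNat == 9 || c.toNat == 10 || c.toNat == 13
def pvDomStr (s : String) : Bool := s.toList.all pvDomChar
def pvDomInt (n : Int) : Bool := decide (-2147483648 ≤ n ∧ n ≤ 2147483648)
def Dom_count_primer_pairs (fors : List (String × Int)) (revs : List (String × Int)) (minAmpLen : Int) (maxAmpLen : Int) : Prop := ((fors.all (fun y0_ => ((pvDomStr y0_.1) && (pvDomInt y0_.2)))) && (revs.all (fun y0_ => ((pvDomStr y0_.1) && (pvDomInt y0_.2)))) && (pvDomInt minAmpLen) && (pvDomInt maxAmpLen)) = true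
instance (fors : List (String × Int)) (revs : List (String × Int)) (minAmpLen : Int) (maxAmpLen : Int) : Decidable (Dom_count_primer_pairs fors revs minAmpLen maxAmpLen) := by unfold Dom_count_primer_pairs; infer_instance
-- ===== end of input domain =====

-- B replaces A's per-element binary searches by a two-pointer linear sweep over the sorted endpoints.
-- ===== PORT A =====
-- fors.values() on a dict parameter (unique keys) is the list of second components.
def count_primer_pairs (fors : List (String × Int)) (revs : List (String × Int)) (minAmpLen : Int) (maxAmpLen : Int) : Int :=
  let sts := PySem.List.sorted (fors.map Prod.snd) (fun x => x)
  let ens_sorted := PySem.List.sorted (revs.map Prod.snd) (fun x => x)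
  sts.foldl (fun count st =>
    let left := PySem.List.bisectLeft ens_sorted (st + minAmpLen)
    let right := PySem.List.bisectRight ens_sorted (st + maxAmpLen)
    count + ((right : Int) - (left : Int))) 0

-- ===== PORT B =====
-- 'while i < n and p(ens[i]): i += 1' from Source B (used for both pointers, with p = (< st+minAmpLen) resp. (≤ st+maxAmpLen))
def pvAdv (ens : List Int) (p : Int → Bool) (i : Nat) : Nat :=
  if h : i < ens.length then
    if p ens[i] then pvAdv ens p (i + 1) else i
  else i
termination_by ens.length - i

-- the 'for st in sts' loop of Source B, carrying the two pointers and the count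
def pvSweep (ens : List Int) (minAmpLen maxAmpLen : Int) : List Int → Nat → Nat → Int → Int
  | [], _, _, count => count
  | st :: rest, lo, hi, count =>
    let lo' := pvAdv ens (fun e => decide (e < st + minAmpLen)) lo
    let hi' := pvAdv ens (fun e => decide (e ≤ st + maxAmpLen)) hi
    pvSweep ens minAmpLen maxAmpLen rest lo' hi' (count + ((hi' : Int) - (lo' : Int)))

def count_primer_pairs_alt (fors : List (String × Int)) (revs : List (String × Int)) (minAmpLen : Int) (maxAmpLen : Int) : Int :=
  let sts := PySem.List.sorted (fors.map Prod.snd) (fun x => x)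
  let ens := PySem.List.sorted (revs.map Prod.snd) (fun x => x)
  pvSweep ens minAmpLen maxAmpLen sts 0 0 0

-- ===== PRECONDITION & SPEC =====
def Spec_count_primer_pairs (fors : List (String × Int)) (revs : List (String × Int)) (minAmpLen : Int) (maxAmpLen : Int) (out : Int) : Prop := out = count_primer_pairs_alt fors revs minAmpLen maxAmpLen
instance (fors : List (String × Int)) (revs : List (String × Int)) (minAmpLen : Int) (maxAmpLen : Int) (out : Int) : Decidable (Spec_count_primer_pairs fors revs minAmpLen maxAmpLen out) := by unfold Spec_count_primer_pairs; infer_instance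

-- ===== CLAIM (what is proved, stated in full; the proofs are below) =====
def Claim_equal_count_primer_pairs : Prop := ∀ (fors : List (String × Int)) (revs : List (String × Int)) (minAmpLen : Int) (maxAmpLen : Int), Dom_count_primer_pairs fors revs minAmpLen maxAmpLen → Spec_count_primer_pairs fors revs minAmpLen maxAmpLen (count_primer_pairs fors revs minAmpLen maxAmpLen)

-- ===== LEMMAS AND PROOFS =====

-- bisect_left is monotone in the needle on a sorted list
theorem pv_bL_mono (ens : List Int) (hens : List.Pairwise (· ≤ ·) ens) {x y : Int} (hxy : x ≤ y) :
    PySem.List.bisectLeft ens x ≤ PySem.List.bisectLeft ens y := by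
  by_contra h
  push Not at h
  obtain ⟨hx1, hx2, hx3⟩ := PySem.List.bisectLeft_spec ens x hens
  obtain ⟨hy1, hy2, hy3⟩ := PySem.List.bisectLeft_spec ens y hens
  have hj : PySem.List.bisectLeft ens y < ens.length := lt_of_lt_of_le h hx1
  have h1 := hx2 _ hj h
  have h2 := hy3 _ hj le_rfl
  omega

theorem pv_bR_mono (ens : List Int) (hens : List.Pairwise (· ≤ ·) ens) {x y : Int} (hxy : x ≤ y) :
    PySem.List.bisectRight ens x ≤ PySem.List.bisectRight ens y := by
  by_contra h
  push Not at h
  obtain ⟨hx1, hx2, hx3⟩ := PySem.List.bisectRight_spec ens x hens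
  obtain ⟨hy1, hy2, hy3⟩ := PySem.List.bisectRight_spec ens y hens
  have hj : PySem.List.bisectRight ens y < ens.length := lt_of_lt_of_le h hx1
  have h1 := hx2 _ hj h
  have h2 := hy3 _ hj le_rfl
  omega

-- the while-loop pvAdv, started at or below the boundary t of predicate p, stops exactly at t
theorem pvAdv_eq_aux (ens : List Int) (p : Int → Bool) (t : Nat)
    (hlen : t ≤ ens.length)
    (hA : ∀ (j : Nat) (hj : j < ens.length), j < t → p ens[j] = true)
    (hB : ∀ (j : Nat) (hj : j < ens.length), t ≤ j → p ens[j] = false) :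
    ∀ (k i : Nat), ens.length - i ≤ k → i ≤ t → pvAdv ens p i = t := by
  intro k
  induction k with
  | zero =>
    intro i hk hi
    unfold pvAdv
    have : ¬ i < ens.length := by omega
    simp only [this, dite_false]
    omega
  | succ k ih =>
    intro i hk hi
    unfold pvAdv
    by_cases h : i < ens.length
    · simp only [h, dite_true]
      by_cases hit : i < t
      · rw [hA i h hit]
        simp only [if_true]
        exact ih (i + 1) (by omega) (by omega)
      · have hit' : i = t := by omega
        rw [hB i h (by omega)]
        exact hit'
    · simp only [h, dite_false]
      omega

theorem pvAdv_eq (ens : List Int) (p : Int → Bool) (t : Nat)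
    (hlen : t ≤ ens.length)
    (hA : ∀ (j : Nat) (hj : j < ens.length), j < t → p ens[j] = true)
    (hB : ∀ (j : Nat) (hj : j < ens.length), t ≤ j → p ens[j] = false)
    (i : Nat) (hi : i ≤ t) : pvAdv ens p i = t :=
  pvAdv_eq_aux ens p t hlen hA hB (ens.length - i) i le_rfl hi

-- the lower pointer's while loop lands on bisect_left
theorem pvAdv_lo (ens : List Int) (hens : List.Pairwise (· ≤ ·) ens) (x : Int) (i : Nat)
    (hi : i ≤ PySem.List.bisectLeft ens x) :
    pvAdv ens (fun e => decide (e < x)) i = PySem.List.bisectLeft ens x := by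
  obtain ⟨h1, h2, h3⟩ := PySem.List.bisectLeft_spec ens x hens
  refine pvAdv_eq ens _ _ h1 ?_ ?_ i hi
  · intro j hj hjt; simpa using h2 j hj hjt
  · intro j hj hjt; simpa using h3 j hj hjt

-- the upper pointer's while loop lands on bisect_right
theorem pvAdv_hi (ens : List Int) (hens : List.Pairwise (· ≤ ·) ens) (x : Int) (i : Nat)
    (hi : i ≤ PySem.List.bisectRight ens x) :
    pvAdv ens (fun e => decide (e ≤ x)) i = PySem.List.bisectRight ens x := by
  obtain ⟨h1, h2, h3⟩ := PySem.List.bisectRight_spec ens x hens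
  refine pvAdv_eq ens _ _ h1 ?_ ?_ i hi
  · intro j hj hjt; simpa using h2 j hj hjt
  · intro j hj hjt
    have := h3 j hj hjt
    simp only [decide_eq_false_iff_not]
    omega

-- the sweep over ascending starts equals A's per-start bisect fold
theorem pvSweep_eq (ens : List Int) (hens : List.Pairwise (· ≤ ·) ens) (minA maxA : Int) :
    ∀ (sts : List Int), List.Pairwise (· ≤ ·) sts →
    ∀ (lo hi : Nat) (count : Int),
      (∀ st ∈ sts, lo ≤ PySem.List.bisectLeft ens (st + minA)) →
      (∀ st ∈ sts, hi ≤ PySem.List.bisectRight ens (st + maxA)) →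
      pvSweep ens minA maxA sts lo hi count =
        sts.foldl (fun count st =>
          let left := PySem.List.bisectLeft ens (st + minA)
          let right := PySem.List.bisectRight ens (st + maxA)
          count + ((right : Int) - (left : Int))) count := by
  intro sts
  induction sts with
  | nil => intro _ lo hi count _ _; rfl
  | cons st rest ih =>
    intro hp lo hi count hlo hhi
    rw [List.pairwise_cons] at hp
    obtain ⟨hhead, htail⟩ := hp
    simp only [pvSweep, List.foldl_cons]
    rw [pvAdv_lo ens hens _ lo (hlo st (List.mem_cons_self)),
        pvAdv_hi ens hens _ hi (hhi st (List.mem_cons_self))]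
    exact ih htail _ _ _
      (fun s hs => pv_bL_mono ens hens (by have := hhead s hs; omega))
      (fun s hs => pv_bR_mono ens hens (by have := hhead s hs; omega))

-- ===== VERDICT (by name: the statement is the Claim_ definition above) =====
theorem count_primer_pairs_spec : Claim_equal_count_primer_pairs := by
  intro fors revs minA maxA _
  unfold Spec_count_primer_pairs count_primer_pairs count_primer_pairs_alt
  rw [pvSweep_eq _ (PySem.List.sorted_pairwise _ _) minA maxA _
      (PySem.List.sorted_pairwise _ _) 0 0 0
      (fun _ _ => Nat.zero_le _) (fun _ _ => Nat.zero_le _)]
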